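-- pv_equiv track=rewrite | github.com/aytekin-side/zeytinyaglarimiz | scripts/filter-iframe-brand-websites.py | frame_ancestors_allow
-- ===== SOURCE A (Python) =====
-- def frame_ancestors_allow(tokens):
--     if not tokens:
--         return True
--     lowered = [token.lower() for token in tokens]
--     if "'none'" in lowered:
--         return False
--     if "*" in lowered or "https:" in lowered or "http:" in lowered:
--         return True
--     return any("zeytinyaglarimiz.com" in token for token in lowered)
-- ===== SOURCE B (Python) =====
-- def _classify(token):
--     low = token.lower()
--     if low == "'none'":
--         return 3
--     if low in ("*", "https:", "http:"):
--         return 2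
--     if "zeytinyaglarimiz.com" in low:
--         return 1
--     return 0
--
--
-- def frame_ancestors_allow(tokens):
--     if not tokens:
--         return True
--     severity = max(_classify(token) for token in tokens)
--     return severity in (1, 2)
-- ===== Notes on version B (the rewrite author's own statement) =====
-- stated objective: alternative
-- what changed: B classifies each token into a numeric severity on a 4-level verdict lattice (deny=3, wildcard/scheme allow=2, brand match=1, neutral=0), aggregates severities with max, and reads the final verdict off the maximum - replacing A's lowered intermediate list and its staged membership/any scans with classify-then-aggregate.
import Mathlib
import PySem

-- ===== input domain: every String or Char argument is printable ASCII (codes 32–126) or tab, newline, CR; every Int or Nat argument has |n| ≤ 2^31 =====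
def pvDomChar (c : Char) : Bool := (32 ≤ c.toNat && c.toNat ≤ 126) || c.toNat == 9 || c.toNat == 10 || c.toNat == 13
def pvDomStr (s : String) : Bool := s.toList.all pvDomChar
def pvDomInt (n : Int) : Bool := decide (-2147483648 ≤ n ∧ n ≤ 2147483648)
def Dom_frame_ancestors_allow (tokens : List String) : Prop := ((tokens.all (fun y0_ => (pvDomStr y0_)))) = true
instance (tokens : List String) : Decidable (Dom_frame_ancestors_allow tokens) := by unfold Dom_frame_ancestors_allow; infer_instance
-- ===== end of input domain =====

-- B replaces A's lowered list and staged membership scans by per-token classification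
-- into a severity lattice (deny=3, allow=2, brand=1, neutral=0) aggregated with max.

-- ===== PORT A =====
def frame_ancestors_allow (tokens : List String) : Bool :=
  if tokens = [] then true
  else
    let lowered := tokens.map PySem.Str.lower
    if lowered.contains "'none'" then false
    else if lowered.contains "*" || lowered.contains "https:" || lowered.contains "http:" then true
    else lowered.any (fun token => PySem.Str.isIn "zeytinyaglarimiz.com" token)

-- ===== PORT B =====
-- per-token severity, B's _classify
def faClassify (token : String) : Int :=
  let low := PySem.Str.lower token
  if low == "'none'" then 3
  else if low == "*" || low == "https:" || low == "http:" then 2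
  else if PySem.Str.isIn "zeytinyaglarimiz.com" low then 1
  else 0

def frame_ancestors_allow_alt (tokens : List String) : Bool :=
  match tokens with
  | [] => true
  | h :: t =>
    let sev := (t.map faClassify).foldl max (faClassify h)
    sev == 1 || sev == 2

-- ===== PRECONDITION & SPEC =====
def Spec_frame_ancestors_allow (tokens : List String) (out : Bool) : Prop := out = frame_ancestors_allow_alt tokens
instance (tokens : List String) (out : Bool) : Decidable (Spec_frame_ancestors_allow tokens out) := by unfold Spec_frame_ancestors_allow; infer_instance

-- ===== CLAIM (what is proved, stated in full; the proofs are below) =====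
def Claim_equal_frame_ancestors_allow : Prop := ∀ (tokens : List String), Dom_frame_ancestors_allow tokens → Spec_frame_ancestors_allow tokens (frame_ancestors_allow tokens)

-- ===== LEMMAS AND PROOFS =====

-- ===== VERDICT (by name: the statement is the Claim_ definition above) =====
-- foldl max reaches k iff the init or some element does
theorem foldl_max_ge (l : List Int) (a k : Int) :
    k ≤ l.foldl max a ↔ k ≤ a ∨ ∃ x ∈ l, k ≤ x := by
  induction l generalizing a with
  | nil => simp
  | cons h t ih => simp [ih]; tauto

theorem foldl_max_le (l : List Int) (a c : Int) (ha : a ≤ c) (hl : ∀ x ∈ l, x ≤ c) :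
    l.foldl max a ≤ c := by
  induction l generalizing a with
  | nil => simpa
  | cons h t ih =>
    exact ih _ (max_le ha (hl h (by simp))) (fun x hx => hl x (by simp [hx]))

theorem faClassify_le (t : String) : faClassify t ≤ 3 := by
  unfold faClassify; dsimp only; split_ifs <;> norm_num

theorem faClassify_ge3 (t : String) :
    3 ≤ faClassify t ↔ PySem.Str.lower t = "'none'" := by
  unfold faClassify; dsimp only; split_ifs <;> simp_all

theorem faClassify_ge2 (t : String) :
    2 ≤ faClassify t ↔ PySem.Str.lower t = "'none'" ∨ PySem.Str.lower t = "*" ∨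
      PySem.Str.lower t = "https:" ∨ PySem.Str.lower t = "http:" := by
  unfold faClassify; dsimp only; split_ifs <;> simp_all <;> tauto

theorem faClassify_ge1 (t : String) :
    1 ≤ faClassify t ↔ PySem.Str.lower t = "'none'" ∨ PySem.Str.lower t = "*" ∨
      PySem.Str.lower t = "https:" ∨ PySem.Str.lower t = "http:" ∨
      PySem.Str.isIn "zeytinyaglarimiz.com" (PySem.Str.lower t) = true := by
  unfold faClassify; dsimp only; split_ifs <;> simp_all <;> tauto

theorem frame_ancestors_allow_spec : Claim_equal_frame_ancestors_allow := by
  intro tokens _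
  unfold Spec_frame_ancestors_allow frame_ancestors_allow frame_ancestors_allow_alt
  match tokens with
  | [] => simp
  | h :: t =>
    simp only [if_neg, reduceCtorEq, not_false_iff]
    set sev := (t.map faClassify).foldl max (faClassify h) with hsev
    have hle : sev ≤ 3 :=
      foldl_max_le _ _ _ (faClassify_le h)
        (by intro x hx; obtain ⟨y, _, rfl⟩ := List.mem_map.mp hx; exact faClassify_le y)
    have hgen : ∀ k : Int, (k ≤ sev ↔ ∃ x ∈ h :: t, k ≤ faClassify x) := by
      intro k
      rw [hsev, foldl_max_ge]
      simp only [List.mem_map, List.mem_cons]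
      constructor
      · rintro (h' | ⟨x, ⟨y, hy, rfl⟩, h'⟩)
        · exact ⟨h, Or.inl rfl, h'⟩
        · exact ⟨y, Or.inr hy, h'⟩
      · rintro ⟨x, rfl | hx, h'⟩
        · exact Or.inl h'
        · exact Or.inr ⟨_, ⟨x, hx, rfl⟩, h'⟩
    have h3 : 3 ≤ sev ↔ ∃ x ∈ h :: t, PySem.Str.lower x = "'none'" := by
      rw [hgen]; simp only [faClassify_ge3]
    have h2 : 2 ≤ sev ↔ (∃ x ∈ h :: t, PySem.Str.lower x = "'none'") ∨
        (∃ x ∈ h :: t, PySem.Str.lower x = "*") ∨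
        (∃ x ∈ h :: t, PySem.Str.lower x = "https:") ∨
        (∃ x ∈ h :: t, PySem.Str.lower x = "http:") := by
      rw [hgen]; simp only [faClassify_ge2, and_or_left, exists_or]
    have h1 : 1 ≤ sev ↔ (∃ x ∈ h :: t, PySem.Str.lower x = "'none'") ∨
        (∃ x ∈ h :: t, PySem.Str.lower x = "*") ∨
        (∃ x ∈ h :: t, PySem.Str.lower x = "https:") ∨
        (∃ x ∈ h :: t, PySem.Str.lower x = "http:") ∨
        (∃ x ∈ h :: t, PySem.Str.isIn "zeytinyaglarimiz.com" (PySem.Str.lower x) = true) := by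
      rw [hgen]; simp only [faClassify_ge1, and_or_left, exists_or]
    have hc1 : (((h :: t).map PySem.Str.lower).contains "'none'" = true) ↔
        ∃ x ∈ h :: t, PySem.Str.lower x = "'none'" := by
      simp only [List.contains_iff_mem, List.mem_map]
    have hc2 : ((((h :: t).map PySem.Str.lower).contains "*" ||
        ((h :: t).map PySem.Str.lower).contains "https:" ||
        ((h :: t).map PySem.Str.lower).contains "http:") = true) ↔
        (∃ x ∈ h :: t, PySem.Str.lower x = "*") ∨
        (∃ x ∈ h :: t, PySem.Str.lower x = "https:") ∨
        (∃ x ∈ h :: t, PySem.Str.lower x = "http:") := by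
      simp only [Bool.or_eq_true, List.contains_iff_mem, List.mem_map]
      rw [or_assoc]
    have hbr : (((h :: t).map PySem.Str.lower).any
        (fun token => PySem.Str.isIn "zeytinyaglarimiz.com" token) = true) ↔
        ∃ x ∈ h :: t, PySem.Str.isIn "zeytinyaglarimiz.com" (PySem.Str.lower x) = true := by
      simp
    by_cases hn : ∃ x ∈ h :: t, PySem.Str.lower x = "'none'"
    · rw [if_pos (hc1.mpr hn)]
      have : sev = 3 := le_antisymm hle (h3.mpr hn)
      simp [this]
    · rw [if_neg (fun c => hn (hc1.mp c))]
      have hlt3 : ¬ 3 ≤ sev := fun c => hn (h3.mp c)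
      by_cases ha : (∃ x ∈ h :: t, PySem.Str.lower x = "*") ∨
          (∃ x ∈ h :: t, PySem.Str.lower x = "https:") ∨
          (∃ x ∈ h :: t, PySem.Str.lower x = "http:")
      · rw [if_pos (hc2.mpr ha)]
        have : sev = 2 := le_antisymm (by omega) (h2.mpr (Or.inr ha))
        simp [this]
      · rw [if_neg (fun c => ha (hc2.mp c))]
        have hlt2 : ¬ 2 ≤ sev := fun c => (h2.mp c).elim hn (fun c' => ha c')
        rw [Bool.eq_iff_iff, hbr]
        constructor
        · intro hb
          have : 1 ≤ sev := h1.mpr (Or.inr (Or.inr (Or.inr (Or.inr hb))))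
          simp only [Bool.or_eq_true, beq_iff_eq]
          omega
        · intro hb
          simp only [Bool.or_eq_true, beq_iff_eq] at hb
          have h1' : 1 ≤ sev := by omega
          rcases h1.mp h1' with h' | h' | h' | h' | h'
          · exact absurd h' hn
          · exact absurd (Or.inl h') ha
          · exact absurd (Or.inr (Or.inl h')) ha
          · exact absurd (Or.inr (Or.inr h')) ha
          · exact h'
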